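-- pv_equiv track=rewrite | github.com/SungjoonCho/CodingTest | 0813 억억단을 외우자.py | solution
-- ===== SOURCE A (Python) =====
-- def solution(e, starts):
--
--
--     # 각각 곱한 결과를 저장
--     infoList = [0 for i in range(e+1)]
--     for r in range(1,e+1):
--         for c in range(r, e+1): # 우상단 삼각형에 해당하는 곳만 계산함 (중복 제외하기 위해)
--             val = r*c
--             if(val > e):
--                 break
--
--             # 둘이 같은 숫자면 한개만 추가
--             if r == c:
--                 infoList[val] += 1
--             else: # 다른 숫자면 순서 바꾸는 케이스도 있으니까 2개 추가
--                 infoList[val] += 2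
--
--     # sort 없앰
--
--     # dp
--     # min(starts)에서 e까지 모두 구해놓고
--     # starts에 있는 인덱스를 가지고 numList에서 필요한 정보 읽어오도록 함
--     numList = [0 for _ in range(e+1)]
--     maxNum = 0
--     for i in range(e, min(starts)-1, -1): # e부터 거꾸로 시작해서 min(starts)까지만 진행
--         if infoList[i] >= maxNum:
--             maxNum = infoList[i]
--             numList[i] = i
--         else:
--             numList[i] = numList[i+1]
--
--     return [numList[i] for i in starts]
-- ===== SOURCE B (Python) =====
-- def solution(e, starts):
--     # divisor-count table via the standard sieve: tau(m) = #{d : d divides m}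
--     tau = [0] * (e + 1)
--     for d in range(1, e + 1):
--         for m in range(d, e + 1, d):
--             tau[m] += 1
--     # single backward scan keeping the running argmax (ties to the smaller index
--     # because of >=); record it at every position instead of the copy-forward DP
--     num = [0] * (e + 1)
--     maxNum, best = 0, 0
--     for i in range(e, min(starts) - 1, -1):
--         if tau[i] >= maxNum:
--             maxNum, best = tau[i], i
--         num[i] = best
--     return [num[i] for i in starts]
-- ===== Notes on version B (the rewrite author's own statement) =====
-- stated objective: alternative
-- what changed: B builds the divisor-count table with the standard divisor sieve (for each d, bump every multiple of d) instead of A's triangular ordered-pair loop with its break and r==c/+2 symmetry, and replaces A's copy-forward DP (numList[i]=numList[i+1] fallback chain) by a single backward scan that keeps the running argmax in a scalar and writes it at every position.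
import Mathlib
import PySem

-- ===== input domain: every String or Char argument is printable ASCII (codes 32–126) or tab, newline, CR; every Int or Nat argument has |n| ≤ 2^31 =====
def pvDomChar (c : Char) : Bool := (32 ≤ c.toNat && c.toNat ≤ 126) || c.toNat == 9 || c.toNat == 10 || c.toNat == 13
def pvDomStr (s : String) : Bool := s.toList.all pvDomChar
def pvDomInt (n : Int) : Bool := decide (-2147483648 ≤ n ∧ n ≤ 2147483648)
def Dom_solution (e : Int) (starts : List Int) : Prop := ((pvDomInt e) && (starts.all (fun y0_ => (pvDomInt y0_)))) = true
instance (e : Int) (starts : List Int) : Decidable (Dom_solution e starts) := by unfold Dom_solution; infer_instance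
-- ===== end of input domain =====

-- B differs from A twice: the divisor-count table is built by the standard divisor sieve instead of
-- A's triangular ordered-pair loop (break at r*c > e, +1/+2 symmetry), and the backward pass keeps
-- the running argmax in a scalar written at every position instead of A's numList[i]=numList[i+1]
-- copy-forward chain.  A's port keeps its tables in `Array Int` via the Python-indexing helpers
-- `pyArrGet`/`pyArrSet` (exact: negative indices wrap, out-of-range reads give the default and
-- out-of-range writes are dropped; Pre_ keeps every executed access in range); B's port is written
-- over `List Int` with the PySem list primitives.

-- a[i] with Python's negative-index rule, default 0 out of range (= PySem.List.pyGetD on toList)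
def pyArrGet (a : Array Int) (i : Int) : Int :=
  if 0 ≤ i then a.getD i.toNat 0
  else if -(a.size : Int) ≤ i then a.getD (a.size - (-i).toNat) 0
  else 0

-- a[i] = v with Python's negative-index rule (= PySem.List.pySetD on toList)
def pyArrSet (a : Array Int) (i : Int) (v : Int) : Array Int :=
  if 0 ≤ i then a.setIfInBounds i.toNat v
  else if -(a.size : Int) ≤ i then a.setIfInBounds (a.size - (-i).toNat) v
  else a

-- ===== PORT A =====
-- inner c-loop of A (c counts up from r, at most e+1-r steps), with its `break` at val = r*c > e
def loopA (e r : Int) : Nat → Int → Array Int → Array Int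
  | 0, _, info => info
  | fuel + 1, c, info =>
      if e < r * c then info
      else loopA e r fuel (c + 1)
        (pyArrSet info (r * c) (pyArrGet info (r * c) + (if r = c then 1 else 2)))

-- infoList of A: [0]*(e+1), then the triangular double loop
def buildA (e : Int) : Array Int :=
  (PySem.List.pyRange 1 (e + 1) 1).foldl
    (fun info r => loopA e r ((e + 1) - r).toNat r info)
    (Array.replicate (e + 1).toNat 0)

-- A's backward DP: i from e down to min(starts), tie rule >=, fallback numList[i] = numList[i+1]
def dpA (e : Int) (starts : List Int) (info : Array Int) : List Int :=
  let lo := (PySem.List.min? starts (fun x => x)).getD 0   -- min(starts); starts ≠ [] under Pre_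
  let st := (PySem.List.pyRange e (lo - 1) (-1)).foldl
    (fun (st : Array Int × Int) i =>
      if st.2 ≤ pyArrGet info i then
        (pyArrSet st.1 i i, pyArrGet info i)
      else
        (pyArrSet st.1 i (pyArrGet st.1 (i + 1)), st.2))
    (Array.replicate (e + 1).toNat 0, (0 : Int))
  starts.map (fun i => pyArrGet st.1 i)

def solution (e : Int) (starts : List Int) : List Int :=
  dpA e starts (buildA e)

-- ===== PORT B =====
-- tau of B: the divisor sieve — for each d, bump every multiple of d up to e
def sieveB (e : Int) : Array Int :=
  (PySem.List.pyRange 1 (e + 1) 1).foldl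
    (fun tau d =>
      (PySem.List.pyRange d (e + 1) d).foldl
        (fun tau m => pyArrSet tau m (pyArrGet tau m + 1)) tau)
    (Array.replicate (e + 1).toNat 0)

-- B's backward scan: state (num, maxNum, best); best is updated by the >= rule and written
-- at every position — no copy-forward read
def solution_alt (e : Int) (starts : List Int) : List Int :=
  let tau := sieveB e
  let lo := (PySem.List.min? starts (fun x => x)).getD 0   -- min(starts); starts ≠ [] under Pre_
  let fin := (PySem.List.pyRange e (lo - 1) (-1)).foldl
    (fun (st : Array Int × Int × Int) i =>
      let mb := if st.2.1 ≤ pyArrGet tau i then (pyArrGet tau i, i) else st.2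
      (pyArrSet st.1 i mb.2, mb))
    (Array.replicate (e + 1).toNat 0, 0, 0)
  starts.map (fun i => pyArrGet fin.1 i)

-- ===== PRECONDITION & SPEC =====
-- Exactly the inputs on which Python A returns: starts non-empty (min of []) and every start a
-- valid (possibly negative, Python-wrapping) index into the length-(e+1) tables.
def Pre_solution (e : Int) (starts : List Int) : Prop :=
  starts ≠ [] ∧ ∀ s ∈ starts, -(e + 1) ≤ s ∧ s ≤ e
instance (e : Int) (starts : List Int) : Decidable (Pre_solution e starts) := by
  unfold Pre_solution; infer_instance
def pvWitness_solution : Int × List Int := (6, [1, 3])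

def Spec_solution (e : Int) (starts : List Int) (out : List Int) : Prop := out = solution_alt e starts
instance (e : Int) (starts : List Int) (out : List Int) : Decidable (Spec_solution e starts out) := by unfold Spec_solution; infer_instance

-- ===== CLAIM (what is proved, stated in full; the proofs are below) =====
def Claim_equal_solution : Prop := ∀ (e : Int) (starts : List Int), Dom_solution e starts → Pre_solution e starts → Spec_solution e starts (solution e starts)

-- ===== LEMMAS AND PROOFS =====
-- list-level models of A's table build and DP (A's arrays project onto these)
def initL (e : Int) : List Int := List.replicate (e + 1).toNat 0

def loopAL (e r : Int) : List Int → List Int → List Int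
  | [], info => info
  | c :: cs, info =>
      if e < r * c then info
      else loopAL e r cs
        (PySem.List.pySetD info (r * c)
          (PySem.List.pyGetD info (r * c) 0 + (if r = c then 1 else 2)))

def buildAL (e : Int) : List Int :=
  (PySem.List.pyRange 1 (e + 1) 1).foldl
    (fun info r => loopAL e r (PySem.List.pyRange r (e + 1) 1) info)
    (initL e)

-- B's table build at list level
def sieveBL (e : Int) : List Int :=
  (PySem.List.pyRange 1 (e + 1) 1).foldl
    (fun tau d =>
      (PySem.List.pyRange d (e + 1) d).foldl
        (fun tau m => PySem.List.pySetD tau m (PySem.List.pyGetD tau m 0 + 1)) tau)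
    (initL e)

-- A's DP fold body, list level
def stepA (info : List Int) (st : List Int × Int) (i : Int) : List Int × Int :=
  if st.2 ≤ PySem.List.pyGetD info i 0 then
    (PySem.List.pySetD st.1 i i, PySem.List.pyGetD info i 0)
  else
    (PySem.List.pySetD st.1 i (PySem.List.pyGetD st.1 (i + 1) 0), st.2)

-- B's scan body (exactly the fold body of solution_alt)
def stepB (info : List Int) (st : List Int × Int × Int) (i : Int) : List Int × Int × Int :=
  let mb := if st.2.1 ≤ PySem.List.pyGetD info i 0
            then (PySem.List.pyGetD info i 0, i) else st.2
  (PySem.List.pySetD st.1 i mb.2, mb)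

-- bridges: Array.getD agrees with List.getD on toList
lemma arr_getD (a : Array Int) (i : Nat) : a.getD i 0 = a.toList.getD i 0 := by
  rw [List.getD_eq_getElem?_getD, Array.getElem?_toList]
  unfold Array.getD
  split_ifs with h
  · rw [Array.getElem?_eq_getElem h]; rfl
  · rw [Array.getElem?_eq_none (by omega)]; rfl

lemma pyArrGet_eq (a : Array Int) (i : Int) :
    pyArrGet a i = PySem.List.pyGetD a.toList i 0 := by
  unfold pyArrGet
  simp only [PySem.List.pyGetD, PySem.List.pyGet?, PySem.List.pyIdx?, Array.length_toList]
  by_cases h1 : 0 ≤ i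
  · rw [if_pos h1, if_pos h1, arr_getD]
    by_cases h2 : i < (a.size : Int)
    · rw [if_pos (by simpa using h2)]
      simp [List.getD_eq_getElem?_getD]
    · rw [if_neg (by simpa using h2)]
      simp only [List.getD_eq_getElem?_getD, Array.getElem?_toList]
      rw [Array.getElem?_eq_none (by omega)]
      rfl
  · rw [if_neg h1, if_neg h1]
    by_cases h3 : -(a.size : Int) ≤ i
    · rw [if_pos h3, if_pos h3, arr_getD]
      simp [List.getD_eq_getElem?_getD]
    · rw [if_neg h3, if_neg h3]
      rfl

lemma pyArrSet_eq (a : Array Int) (i v : Int) :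
    (pyArrSet a i v).toList = PySem.List.pySetD a.toList i v := by
  unfold pyArrSet
  simp only [PySem.List.pySetD, PySem.List.pySet?, PySem.List.pyIdx?, Array.length_toList]
  by_cases h1 : 0 ≤ i
  · rw [if_pos h1, if_pos h1, Array.toList_setIfInBounds]
    by_cases h2 : i < (a.size : Int)
    · rw [if_pos (by simpa using h2)]
      rfl
    · rw [if_neg (by simpa using h2)]
      simp only [Option.map_none, Option.getD_none]
      exact List.set_eq_of_length_le (by rw [Array.length_toList]; omega)
  · rw [if_neg h1, if_neg h1]
    by_cases h3 : -(a.size : Int) ≤ i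
    · rw [if_pos h3, if_pos h3, Array.toList_setIfInBounds]
      rfl
    · rw [if_neg h3, if_neg h3]
      rfl

lemma toList_loopA (e r : Int) : ∀ (fuel : Nat) (c : Int) (a : Array Int),
    fuel = ((e + 1) - c).toNat →
    (loopA e r fuel c a).toList = loopAL e r (PySem.List.pyRange c (e + 1) 1) a.toList := by
  intro fuel
  induction fuel with
  | zero =>
    intro c a hf
    rw [PySem.List.pyRange_one_eq_nil (by omega)]
    rfl
  | succ fuel ih =>
    intro c a hf
    rw [PySem.List.pyRange_one_cons (by omega)]
    by_cases h : e < r * c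
    · simp [loopA, loopAL, h]
    · simp only [loopA, loopAL, if_neg h]
      rw [ih (c + 1) _ (by omega), pyArrSet_eq, pyArrGet_eq]

lemma toList_buildA (e : Int) : (buildA e).toList = buildAL e := by
  unfold buildA buildAL initL
  rw [← Array.toList_replicate (n := (e + 1).toNat) (a := (0 : Int))]
  exact (List.foldl_hom Array.toList
    (fun a r => (toList_loopA e r ((e + 1) - r).toNat r a rfl).symm)).symm

-- A's whole program at list level
lemma solution_eq_list (e : Int) (starts : List Int) :
    solution e starts =
      starts.map (fun i => PySem.List.pyGetD
        (((PySem.List.pyRange e ((PySem.List.min? starts (fun x => x)).getD 0 - 1) (-1)).foldl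
            (stepA (buildAL e)) (initL e, (0 : Int))).1) i 0) := by
  unfold solution dpA
  have hfold := List.foldl_hom
    (l := PySem.List.pyRange e ((PySem.List.min? starts (fun x => x)).getD 0 - 1) (-1))
    (init := (Array.replicate (e + 1).toNat (0 : Int), (0 : Int)))
    (fun st : Array Int × Int => (st.1.toList, st.2))
    (g₁ := fun st i =>
      if st.2 ≤ pyArrGet (buildA e) i then
        (pyArrSet st.1 i i, pyArrGet (buildA e) i)
      else
        (pyArrSet st.1 i (pyArrGet st.1 (i + 1)), st.2))
    (g₂ := stepA (buildAL e))
    (fun st i => by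
      simp only [stepA, pyArrGet_eq, toList_buildA]
      split_ifs <;> simp [pyArrSet_eq])
  simp only [Array.toList_replicate] at hfold
  have h1 := congrArg Prod.fst hfold
  dsimp only at h1
  refine List.map_congr_left (fun i _ => ?_)
  rw [pyArrGet_eq, ← h1]
  rfl

-- B's table build projects onto its list model
lemma toList_sieveB (e : Int) : (sieveB e).toList = sieveBL e := by
  unfold sieveB sieveBL initL
  rw [← Array.toList_replicate (n := (e + 1).toNat) (a := (0 : Int))]
  refine (List.foldl_hom Array.toList (fun a d => ?_)).symm
  exact List.foldl_hom Array.toList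
    (fun a m => by rw [pyArrSet_eq, pyArrGet_eq])

-- B's whole program at list level
lemma solutionAlt_eq_list (e : Int) (starts : List Int) :
    solution_alt e starts =
      starts.map (fun i => PySem.List.pyGetD
        (((PySem.List.pyRange e ((PySem.List.min? starts (fun x => x)).getD 0 - 1) (-1)).foldl
            (stepB (sieveBL e)) (initL e, (0 : Int), (0 : Int))).1) i 0) := by
  unfold solution_alt
  have hfold := List.foldl_hom
    (l := PySem.List.pyRange e ((PySem.List.min? starts (fun x => x)).getD 0 - 1) (-1))
    (init := (Array.replicate (e + 1).toNat (0 : Int), (0 : Int), (0 : Int)))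
    (fun st : Array Int × Int × Int => (st.1.toList, st.2))
    (g₁ := fun st i =>
      let mb := if st.2.1 ≤ pyArrGet (sieveB e) i then (pyArrGet (sieveB e) i, i) else st.2
      (pyArrSet st.1 i mb.2, mb))
    (g₂ := stepB (sieveBL e))
    (fun st i => by
      simp only [stepB, pyArrGet_eq, toList_sieveB]
      split_ifs <;> simp [pyArrSet_eq])
  simp only [Array.toList_replicate] at hfold
  have h1 := congrArg Prod.fst hfold
  dsimp only at h1
  refine List.map_congr_left (fun i _ => ?_)
  rw [pyArrGet_eq, ← h1]
  rfl

-- === the two table builds agree ===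
-- one `info[i] += v` step, event style
def bump (info : List Int) (p : Int × Int) : List Int :=
  PySem.List.pySetD info p.1 (PySem.List.pyGetD info p.1 0 + p.2)

def evA (e : Int) : List (Int × Int) :=
  (PySem.List.pyRange 1 (e + 1) 1).flatMap (fun r =>
    ((PySem.List.pyRange r (e + 1) 1).takeWhile (fun c => decide (r * c ≤ e))).map
      (fun c => (r * c, if r = c then (1 : Int) else 2)))

def evB (e : Int) : List (Int × Int) :=
  (PySem.List.pyRange 1 (e + 1) 1).flatMap (fun d =>
    (PySem.List.pyRange d (e + 1) d).map (fun m => (m, (1 : Int))))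

lemma loopAL_eq (e r : Int) : ∀ (cs info : List Int),
    loopAL e r cs info =
      ((cs.takeWhile (fun c => decide (r * c ≤ e))).map
        (fun c => (r * c, if r = c then (1 : Int) else 2))).foldl bump info := by
  intro cs
  induction cs with
  | nil => intro info; simp [loopAL]
  | cons c cs ih =>
    intro info
    by_cases h : e < r * c
    · have hc : (decide (r * c ≤ e)) = false := by simp; omega
      simp [loopAL, h, hc]
    · have hc : (decide (r * c ≤ e)) = true := by simp; omega
      simp only [loopAL, if_neg h, List.takeWhile_cons, hc]
      rw [ih]
      rfl

lemma buildAL_eq (e : Int) : buildAL e = (evA e).foldl bump (initL e) := by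
  unfold buildAL evA
  rw [List.foldl_flatMap]
  congr 1
  funext info r
  rw [loopAL_eq]

lemma sieveBL_eq (e : Int) : sieveBL e = (evB e).foldl bump (initL e) := by
  unfold sieveBL evB initL
  rw [List.foldl_flatMap]
  congr 1
  funext info d
  rw [List.foldl_map]
  rfl

lemma foldl_bump_length : ∀ (ev : List (Int × Int)) (l : List Int),
    (ev.foldl bump l).length = l.length := by
  intro ev
  induction ev with
  | nil => intro l; rfl
  | cons p ev ih =>
    intro l
    simp only [List.foldl_cons, ih]
    simp [bump, PySem.List.length_pySetD]

lemma foldl_bump_getD : ∀ (ev : List (Int × Int)) (l : List Int) (m : Nat), m < l.length →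
    (∀ p ∈ ev, 0 ≤ p.1 ∧ p.1 < (l.length : Int)) →
    PySem.List.pyGetD (ev.foldl bump l) (m : Int) 0
      = PySem.List.pyGetD l (m : Int) 0
        + (ev.map (fun p => if p.1 = (m : Int) then p.2 else 0)).sum := by
  intro ev
  induction ev with
  | nil => intro l m _ _; simp
  | cons p ev ih =>
    intro l m hm hg
    obtain ⟨hp0, hplt⟩ := hg p (List.mem_cons_self)
    have hlen : (bump l p).length = l.length := by
      simp [bump, PySem.List.length_pySetD]
    have hstep : PySem.List.pyGetD (bump l p) (m : Int) 0
        = PySem.List.pyGetD l (m : Int) 0 + (if p.1 = (m : Int) then p.2 else 0) := by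
      unfold bump
      rw [PySem.List.pySetD_of_nonneg _ _ hp0,
          PySem.List.pyGetD_eq_getElem _ _ hp0 hplt]
      simp only [PySem.List.pyGetD_natCast]
      by_cases hcase : p.1 = (m : Int)
      · have hnat : p.1.toNat = m := by omega
        rw [← hnat] at hm ⊢
        rw [if_pos (show p.1 = ((p.1.toNat : Nat) : Int) by omega)]
        rw [List.getD_eq_getElem?_getD, List.getElem?_set_self hm, Option.getD_some,
            List.getD_eq_getElem l 0 hm]
      · have hne : p.1.toNat ≠ m := by omega
        simp [hcase, List.getD_eq_getElem?_getD, List.getElem?_set_ne hne]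
    rw [List.foldl_cons,
        ih (bump l p) m (by omega)
          (fun q hq => by rw [hlen]; exact hg q (List.mem_cons_of_mem _ hq)),
        hstep]
    simp only [List.map_cons, List.sum_cons]
    ring

lemma initL_length (e : Int) : (initL e).length = (e + 1).toNat := by
  unfold initL
  simp

lemma evA_good (e : Int) : ∀ p ∈ evA e, 0 ≤ p.1 ∧ p.1 < e + 1 := by
  intro p hp
  unfold evA at hp
  simp only [List.mem_flatMap, List.mem_map] at hp
  obtain ⟨r, hr, c, hc, rfl⟩ := hp
  have hr' := (PySem.List.mem_pyRange_one).mp hr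
  have hcle : r * c ≤ e := by
    have := List.mem_takeWhile_imp hc
    simpa using this
  have hcmem : c ∈ PySem.List.pyRange r (e + 1) 1 :=
    (List.takeWhile_sublist _).mem hc
  have hc' := (PySem.List.mem_pyRange_one).mp hcmem
  constructor
  · have : (0:Int) < r * c := by
      have h1 : (0:Int) < r := by omega
      have h2 : (0:Int) < c := by omega
      exact mul_pos h1 h2
    simp only []
    omega
  · simp only []
    omega

lemma evB_good (e : Int) : ∀ p ∈ evB e, 0 ≤ p.1 ∧ p.1 < e + 1 := by
  intro p hp
  unfold evB at hp
  simp only [List.mem_flatMap, List.mem_map] at hp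
  obtain ⟨d, hd, k, hk, rfl⟩ := hp
  have hd' := (PySem.List.mem_pyRange_one).mp hd
  have hk' := (PySem.List.mem_pyRange_iff_of_pos (by omega) k).mp hk
  constructor <;> simp <;> omega

-- takeWhile = filter on a list whose predicate never recovers once false
lemma takeWhile_eq_filter_of_pairwise {α : Type} (p : α → Bool) :
    ∀ (l : List α), l.Pairwise (fun x y => p y = true → p x = true) →
      l.takeWhile p = l.filter p := by
  intro l
  induction l with
  | nil => intro _; rfl
  | cons a l ih =>
    intro hpw
    rw [List.pairwise_cons] at hpw
    by_cases h : p a = true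
    · simp [h, ih hpw.2]
    · simp only [List.takeWhile_cons, List.filter_cons, h]
      simp only [Bool.false_eq_true, ite_false]
      rw [List.filter_eq_nil_iff.mpr]
      intro x hx hpx
      exact h (hpw.1 x hx hpx)

-- sum over a filtered list as a sum of ites
lemma sum_map_filter_eq (p : Int → Bool) (f : Int → Int) :
    ∀ (l : List Int), ((l.filter p).map f).sum = (l.map (fun x => if p x then f x else 0)).sum := by
  intro l
  induction l with
  | nil => rfl
  | cons a l ih =>
    by_cases h : p a = true
    · simp [h, ih]
    · simp [h, ih]

lemma sum_flatMap_int {α : Type} (f : α → List Int) :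
    ∀ (l : List α), (l.flatMap f).sum = (l.map (fun a => (f a).sum)).sum := by
  intro l
  induction l with
  | nil => rfl
  | cons a l ih => simp [List.flatMap_cons, ih]

-- list sum over a step-1 range as a Finset sum
lemma sum_pyRange_one (a b : Int) (f : Int → Int) :
    ((PySem.List.pyRange a b 1).map f).sum = ∑ k ∈ Finset.range (b - a).toNat, f (a + (k : Int)) := by
  rw [PySem.List.pyRange_one, List.map_map]; rfl

-- list sum over a positive-step range as a Finset sum
lemma sum_pyRange_pos (a b s : Int) (hs : 0 < s) (f : Int → Int) :
    ((PySem.List.pyRange a b s).map f).sum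
      = ∑ k ∈ Finset.range (if a < b then ((b - a + s - 1) / s).toNat else 0), f (a + s * (k : Int)) := by
  rw [PySem.List.pyRange_of_pos a b hs, List.map_map]; rfl

-- core arithmetic, inner sum (row r = 1+i of A)
lemma core_inner (E m i : Nat) (hi : i < E) (hm : m ≤ E) :
    (∑ j ∈ Finset.range (E - i), (if (1 + i) * (1 + i + j) = m then (if j = 0 then (1 : Int) else 2) else 0))
      = if (1 + i) ∣ m ∧ (1 + i) * (1 + i) ≤ m then (if (1 + i) * (1 + i) = m then (1 : Int) else 2) else 0 := by
  by_cases hc : (1 + i) ∣ m ∧ (1 + i) * (1 + i) ≤ m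
  · obtain ⟨hdvd, hsq⟩ := hc
    have hrpos : 0 < 1 + i := by omega
    have hmr : (1 + i) * (m / (1 + i)) = m := Nat.mul_div_cancel' hdvd
    have hler : 1 + i ≤ m / (1 + i) := (Nat.le_div_iff_mul_le hrpos).mpr hsq
    have hdle : m / (1 + i) ≤ m := Nat.div_le_self m (1 + i)
    have hj0mem : m / (1 + i) - (1 + i) ∈ Finset.range (E - i) := by
      apply Finset.mem_range.mpr; omega
    rw [Finset.sum_eq_single (m / (1 + i) - (1 + i))
        (fun b _ hb => if_neg (fun hcond => hb (by
          have : 1 + i + b = m / (1 + i) :=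
            Nat.eq_of_mul_eq_mul_left hrpos (by rw [hcond, hmr])
          omega)))
        (fun h => absurd hj0mem h)]
    have hcond : (1 + i) * (1 + i + (m / (1 + i) - (1 + i))) = m := by
      rw [show 1 + i + (m / (1 + i) - (1 + i)) = m / (1 + i) from by omega, hmr]
    rw [if_pos hcond, if_pos (And.intro hdvd hsq)]
    refine if_congr ⟨fun h0 => ?_, fun hsqeq => ?_⟩ rfl rfl
    · have : m / (1 + i) = 1 + i := by omega
      rw [← hmr, this]
    · have : m / (1 + i) = 1 + i :=
        Nat.eq_of_mul_eq_mul_left hrpos (by rw [hmr, hsqeq])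
      omega
  · rw [if_neg hc]
    apply Finset.sum_eq_zero
    intro j _
    apply if_neg
    intro hcond
    exact hc ⟨⟨1 + i + j, hcond.symm⟩, by
      calc (1 + i) * (1 + i) ≤ (1 + i) * (1 + i + j) := Nat.mul_le_mul_left _ (by omega)
        _ = m := hcond⟩

-- core arithmetic, inner sum (row d = 1+i of B's sieve)
lemma core_innerB (E m i : Nat) (hm : m ≤ E) :
    (∑ k ∈ Finset.range (E / (1 + i)), (if (1 + i) * (1 + k) = m then (1 : Int) else 0))
      = if (1 + i) ∣ m ∧ 1 + i ≤ m then (1 : Int) else 0 := by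
  by_cases hc : (1 + i) ∣ m ∧ 1 + i ≤ m
  · obtain ⟨hdvd, hle⟩ := hc
    have hrpos : 0 < 1 + i := by omega
    have hmr : (1 + i) * (m / (1 + i)) = m := Nat.mul_div_cancel' hdvd
    have h1le : 1 ≤ m / (1 + i) := (Nat.one_le_div_iff hrpos).mpr hle
    have hk0mem : m / (1 + i) - 1 ∈ Finset.range (E / (1 + i)) := by
      apply Finset.mem_range.mpr
      have := Nat.div_le_div_right (c := 1 + i) hm
      omega
    rw [Finset.sum_eq_single (m / (1 + i) - 1)
        (fun b _ hb => if_neg (fun hcond => hb (by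
          have : 1 + b = m / (1 + i) :=
            Nat.eq_of_mul_eq_mul_left hrpos (by rw [hcond, hmr])
          omega)))
        (fun h => absurd hk0mem h)]
    rw [if_pos (by rw [show 1 + (m / (1 + i) - 1) = m / (1 + i) from by omega, hmr]),
        if_pos (And.intro hdvd hle)]
  · rw [if_neg hc]
    apply Finset.sum_eq_zero
    intro k _
    apply if_neg
    intro hcond
    exact hc ⟨⟨1 + k, hcond.symm⟩, by
      calc 1 + i = (1 + i) * 1 := by ring
        _ ≤ (1 + i) * (1 + k) := Nat.mul_le_mul_left _ (by omega)
        _ = m := hcond⟩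

-- core arithmetic, outer sum: weighted ≤-pairs vs divisor count
lemma core (E m : Nat) (hm : m ≤ E) :
    (∑ i ∈ Finset.range E, (if (1 + i) ∣ m ∧ (1 + i) * (1 + i) ≤ m then (if (1 + i) * (1 + i) = m then (1 : Int) else 2) else 0))
      = ∑ i ∈ Finset.range E, (if (1 + i) ∣ m ∧ 1 + i ≤ m then (1 : Int) else 0) := by
  by_cases hm0 : m = 0
  · subst hm0
    refine Finset.sum_congr rfl (fun i _ => ?_)
    have hpos : 0 < (1 + i) * (1 + i) := Nat.mul_pos (by omega) (by omega)
    rw [if_neg (fun h => by omega), if_neg (fun h => by omega)]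
  · have hm1 : 0 < m := by omega
    rw [← sub_eq_zero, ← Finset.sum_sub_distrib]
    have hstep : ∀ i ∈ Finset.range E,
        ((if (1 + i) ∣ m ∧ (1 + i) * (1 + i) ≤ m then (if (1 + i) * (1 + i) = m then (1 : Int) else 2) else 0)
          - (if (1 + i) ∣ m ∧ 1 + i ≤ m then (1 : Int) else 0))
        = (fun d => if d ∣ m then (if d * d < m then (1 : Int) else if d * d = m then 0 else -1) else 0) (1 + i) := by
      intro i _
      simp only []
      by_cases hd : (1 + i) ∣ m
      · have hle : 1 + i ≤ m := Nat.le_of_dvd hm1 hd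
        simp only [hd, hle, and_true, true_and, if_true]
        split_ifs <;> omega
      · simp only [hd, false_and, if_false]
        norm_num
    rw [Finset.sum_congr rfl hstep]
    have hreindex : (∑ i ∈ Finset.range E,
          (fun d => if d ∣ m then (if d * d < m then (1 : Int) else if d * d = m then 0 else -1) else 0) (1 + i))
        = ∑ d ∈ Finset.Ico 1 (E + 1),
            (if d ∣ m then (if d * d < m then (1 : Int) else if d * d = m then 0 else -1) else 0) := by
      rw [Finset.sum_Ico_eq_sum_range]
      simp
    rw [hreindex]
    rw [← Finset.sum_subset
        (show m.divisors ⊆ Finset.Ico 1 (E + 1) from fun d hd => by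
          have h1 := Nat.pos_of_mem_divisors hd
          have h2 := Nat.le_of_dvd hm1 (Nat.mem_divisors.mp hd).1
          exact Finset.mem_Ico.mpr ⟨h1, by omega⟩)
        (fun d _ hd => if_neg (fun hdvd => hd (Nat.mem_divisors.mpr ⟨hdvd, hm0⟩)))]
    apply Finset.sum_involution (fun d _ => m / d)
    · intro d hd
      obtain ⟨hdvd, _⟩ := Nat.mem_divisors.mp hd
      have hdpos : 0 < d := Nat.pos_of_mem_divisors hd
      have hmr : d * (m / d) = m := Nat.mul_div_cancel' hdvd
      have hqpos : 0 < m / d := by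
        rcases Nat.eq_zero_or_pos (m / d) with h | h
        · rw [h, Nat.mul_zero] at hmr; omega
        · exact h
      have hqdvd : m / d ∣ m := Nat.div_dvd_of_dvd hdvd
      simp only [hdvd, hqdvd, if_true]
      rcases lt_trichotomy (d * d) m with h | h | h
      · have hlt : d < m / d := by nlinarith
        have hq : m < (m / d) * (m / d) := by nlinarith
        split_ifs <;> omega
      · have hqd : m / d = d := Nat.eq_of_mul_eq_mul_left hdpos (by rw [hmr, h])
        rw [hqd]
        split_ifs <;> omega
      · have hlt : m / d < d := by nlinarith
        have hq : (m / d) * (m / d) < m := by nlinarith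
        split_ifs <;> omega
    · intro d hd hne
      obtain ⟨hdvd, _⟩ := Nat.mem_divisors.mp hd
      have hdpos : 0 < d := Nat.pos_of_mem_divisors hd
      have hmr : d * (m / d) = m := Nat.mul_div_cancel' hdvd
      intro heq
      apply hne
      have hddm : d * d = m := by rw [← hmr, heq]
      simp only [hdvd, if_true]
      split_ifs <;> omega
    · intro d hd
      exact Nat.mem_divisors.mpr ⟨Nat.div_dvd_of_dvd (Nat.mem_divisors.mp hd).1, hm0⟩
    · intro d hd
      exact Nat.div_div_self (Nat.mem_divisors.mp hd).1 hm0

-- the two delta-sums agree at every index of the table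
lemma sums_eq (e : Int) (m : Nat) (hm : (m : Int) < e + 1) :
    ((evA e).map (fun p => if p.1 = (m : Int) then p.2 else 0)).sum
      = ((evB e).map (fun p => if p.1 = (m : Int) then p.2 else 0)).sum := by
  obtain ⟨E, rfl⟩ : ∃ E : Nat, e = (E : Int) := ⟨e.toNat, by omega⟩
  have hmE : m ≤ E := by exact_mod_cast (by omega : (m : Int) ≤ E)
  unfold evA evB
  rw [List.map_flatMap, List.map_flatMap, sum_flatMap_int, sum_flatMap_int]
  -- rewrite the A-side inner sums
  have hA : ∀ r ∈ PySem.List.pyRange 1 ((E : Int) + 1) 1,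
      ((((PySem.List.pyRange r ((E : Int) + 1) 1).takeWhile (fun c => decide (r * c ≤ (E : Int)))).map
          (fun c => (r * c, if r = c then (1 : Int) else 2))).map
        (fun p => if p.1 = (m : Int) then p.2 else 0)).sum
      = ((PySem.List.pyRange r ((E : Int) + 1) 1).map
          (fun c => if r * c = (m : Int) then (if r = c then (1 : Int) else 2) else 0)).sum := by
    intro r hr
    have hr1 : 1 ≤ r := ((PySem.List.mem_pyRange_one).mp hr).1
    rw [takeWhile_eq_filter_of_pairwise _ _
        ((PySem.List.pairwise_lt_pyRange_one r ((E : Int) + 1)).imp ?step)]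
    · rw [List.map_map, sum_map_filter_eq]
      refine congrArg List.sum (List.map_congr_left ?_)
      intro c hc
      simp only [Function.comp]
      by_cases h1 : r * c = (m : Int)
      · have hle : decide (r * c ≤ (E : Int)) = true := by
          simp only [decide_eq_true_eq]; omega
        simp [h1]
        omega
      · by_cases h2 : decide (r * c ≤ (E : Int)) = true <;> simp [h1, h2]
    · intro a b hab hqb
      simp only [decide_eq_true_eq] at hqb ⊢
      have := mul_le_mul_of_nonneg_left (le_of_lt hab) (by omega : (0 : Int) ≤ r)
      omega
  rw [List.map_congr_left hA]
  rw [sum_pyRange_one, sum_pyRange_one]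
  have hE1 : (((E : Int) + 1) - 1).toNat = E := by omega
  rw [hE1]
  calc
    (∑ k ∈ Finset.range E, ((PySem.List.pyRange (1 + (k : Int)) ((E : Int) + 1) 1).map
        (fun c => if (1 + (k : Int)) * c = (m : Int) then (if (1 + (k : Int)) = c then (1 : Int) else 2) else 0)).sum)
        = ∑ k ∈ Finset.range E, ∑ j ∈ Finset.range (E - k),
            (if (1 + k) * (1 + k + j) = m then (if j = 0 then (1 : Int) else 2) else 0) := by
      refine Finset.sum_congr rfl (fun k hk => ?_)
      have hkE : k < E := Finset.mem_range.mp hk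
      rw [sum_pyRange_one]
      have hsub : (((E : Int) + 1) - (1 + (k : Int))).toNat = E - k := by omega
      rw [hsub]
      refine Finset.sum_congr rfl (fun j _ => ?_)
      have h1 : ((1 + (k : Int)) * ((1 + (k : Int)) + (j : Int)) = (m : Int)) ↔ ((1 + k) * (1 + k + j) = m) := by
        constructor <;> intro h <;> exact_mod_cast h
      have h2 : ((1 + (k : Int)) = (1 + (k : Int)) + (j : Int)) ↔ (j = 0) := by omega
      exact if_congr h1 (if_congr h2 rfl rfl) rfl
    _ = ∑ k ∈ Finset.range E,
            (if (1 + k) ∣ m ∧ (1 + k) * (1 + k) ≤ m then (if (1 + k) * (1 + k) = m then (1 : Int) else 2) else 0) :=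
      Finset.sum_congr rfl (fun k hk => core_inner E m k (Finset.mem_range.mp hk) hmE)
    _ = ∑ k ∈ Finset.range E, (if (1 + k) ∣ m ∧ 1 + k ≤ m then (1 : Int) else 0) := core E m hmE
    _ = ∑ k ∈ Finset.range E, ∑ j ∈ Finset.range (E / (1 + k)),
            (if (1 + k) * (1 + j) = m then (1 : Int) else 0) :=
      (Finset.sum_congr rfl (fun k _ => core_innerB E m k hmE)).symm
    _ = ∑ k ∈ Finset.range E, ((List.map (fun p => if p.1 = (m : Int) then p.2 else 0)
          (List.map (fun x => (x, (1 : Int))) (PySem.List.pyRange (1 + (k : Int)) ((E : Int) + 1) (1 + (k : Int))))).sum) := by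
      refine Finset.sum_congr rfl (fun k hk => ?_)
      have hkE : k < E := Finset.mem_range.mp hk
      rw [List.map_map, sum_pyRange_pos _ _ _ (by omega : (0 : Int) < 1 + (k : Int))]
      rw [if_pos (by omega : (1 + (k : Int)) < (E : Int) + 1)]
      have hnum : ((E : Int) + 1 - (1 + (k : Int)) + (1 + (k : Int)) - 1) = ((E : Nat) : Int) := by ring
      have hden : (1 + (k : Int)) = ((1 + k : Nat) : Int) := by push_cast; ring
      rw [hnum, hden]
      have hdiv : ((E : Int) / ((1 + k : Nat) : Int)).toNat = E / (1 + k) := by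
        rw [← Int.natCast_div, Int.toNat_natCast]
      rw [hdiv]
      refine (Finset.sum_congr rfl (fun j _ => ?_)).symm
      simp only [Function.comp]
      have h1 : (((1 + k : Nat) : Int) + ((1 + k : Nat) : Int) * (j : Int) = (m : Int)) ↔ ((1 + k) * (1 + j) = m) := by
        rw [show (1 + k) * (1 + j) = (1 + k) + (1 + k) * j from by ring]
        constructor <;> intro h <;> exact_mod_cast h
      exact if_congr h1 rfl rfl

lemma table_eq (e : Int) : buildAL e = sieveBL e := by
  rw [buildAL_eq, sieveBL_eq]
  have hlenA := foldl_bump_length (evA e) (initL e)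
  have hlenB := foldl_bump_length (evB e) (initL e)
  have hinit := initL_length e
  apply List.ext_getElem (by rw [hlenA, hlenB])
  intro m h1 h2
  have hm : m < (initL e).length := by omega
  have hlt : (m : Int) < e + 1 := by omega
  have conv : ∀ (l : List Int) (h : m < l.length), l[m] = PySem.List.pyGetD l (m : Int) 0 := by
    intro l h
    rw [PySem.List.pyGetD_natCast, List.getD_eq_getElem _ _ h]
  rw [conv _ h1, conv _ h2,
      foldl_bump_getD (evA e) (initL e) m hm
        (fun p hp => by have := evA_good e p hp; constructor; exact this.1; omega),
      foldl_bump_getD (evB e) (initL e) m hm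
        (fun p hp => by have := evB_good e p hp; constructor; exact this.1; omega),
      sums_eq e m hlt]

-- the built table is entrywise nonnegative (needed only at index e, for the first DP step)
lemma sieveBL_nonneg (e : Int) (he : 0 ≤ e) : 0 ≤ PySem.List.pyGetD (sieveBL e) e 0 := by
  obtain ⟨E, rfl⟩ : ∃ E : Nat, e = (E : Int) := ⟨e.toNat, by omega⟩
  rw [sieveBL_eq]
  have hm : E < (initL (E : Int)).length := by rw [initL_length]; omega
  rw [foldl_bump_getD (evB (E : Int)) (initL (E : Int)) E hm
      (fun p hp => by
        have := evB_good (E : Int) p hp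
        rw [initL_length]
        exact ⟨this.1, by omega⟩)]
  have h0 : PySem.List.pyGetD (initL (E : Int)) ((E : Nat) : Int) 0 = 0 := by
    rw [PySem.List.pyGetD_natCast]
    unfold initL
    rw [List.getD_eq_getElem?_getD, List.getElem?_replicate]
    rw [if_pos (by omega)]
    rfl
  rw [h0, zero_add]
  apply List.sum_nonneg
  intro x hx
  simp only [List.mem_map] at hx
  obtain ⟨p, hp, rfl⟩ := hx
  unfold evB at hp
  simp only [List.mem_flatMap, List.mem_map] at hp
  obtain ⟨d, _, k, _, rfl⟩ := hp
  split_ifs <;> norm_num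

-- Python list assignment at a negative in-range index
lemma pySetD_neg (xs : List Int) (i v : Int) (h0 : i < 0) (h1 : -(xs.length : Int) ≤ i) :
    PySem.List.pySetD xs i v = xs.set (xs.length - (-i).toNat) v := by
  simp only [PySem.List.pySetD, PySem.List.pySet?, PySem.List.pyIdx?]
  rw [if_neg (by omega), if_pos (by omega)]
  simp only [Option.map_some, Option.getD_some]

-- reading back the position just written (any in-range, possibly negative index)
lemma pyGetD_pySetD_self (xs : List Int) (i v d : Int)
    (h1 : -(xs.length : Int) ≤ i) (h2 : i < (xs.length : Int)) :
    PySem.List.pyGetD (PySem.List.pySetD xs i v) i d = v := by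
  by_cases h0 : 0 ≤ i
  · rw [PySem.List.pySetD_of_nonneg _ _ h0,
        PySem.List.pyGetD_eq_getElem _ d h0 (by simpa using h2)]
    simp
  · obtain ⟨k, hki, hk1, hk2⟩ : ∃ k : Nat, i = -(k : Int) ∧ 0 < k ∧ k ≤ xs.length :=
      ⟨(-i).toNat, by omega, by omega, by omega⟩
    subst hki
    rw [pySetD_neg xs _ v (by omega) h1]
    simp only [neg_neg, Int.toNat_natCast]
    rw [PySem.List.pyGetD_neg_natCast _ _ _ hk1
        (by simp only [List.length_set]; exact hk2)]
    simp only [List.length_set]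
    exact List.getElem_set_self (by simp only [List.length_set]; omega)

-- the DP invariant: A's fold and B's fold build the same list, as long as the cell at i+1
-- holds B's running best (or the >= branch is about to fire)
lemma dp_inv (info : List Int) (e lo : Int) (hlo : -(e + 1) ≤ lo) :
    ∀ (n : Nat) (i : Int), i = lo + n - 1 → i ≤ e →
    ∀ (num : List Int) (maxN best : Int), num.length = (e + 1).toNat →
    (PySem.List.pyGetD num (i + 1) 0 = best ∨ maxN ≤ PySem.List.pyGetD info i 0) →
    ((PySem.List.pyRange i (lo - 1) (-1)).foldl (stepA info) (num, maxN)).1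
      = ((PySem.List.pyRange i (lo - 1) (-1)).foldl (stepB info) (num, maxN, best)).1 := by
  intro n
  induction n with
  | zero =>
    intro i hi _ num maxN best _ _
    rw [PySem.List.pyRange_neg_one_eq_nil (by omega)]
    rfl
  | succ n ih =>
    intro i hi hie num maxN best hlen hH
    have hilo : lo ≤ i := by omega
    have hibd : -(num.length : Int) ≤ i ∧ i < (num.length : Int) := by
      rw [hlen]; constructor <;> omega
    rw [PySem.List.pyRange_neg_one_cons (by omega)]
    simp only [List.foldl_cons]
    by_cases h : maxN ≤ PySem.List.pyGetD info i 0
    · have hstepA : stepA info (num, maxN) i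
          = (PySem.List.pySetD num i i, PySem.List.pyGetD info i 0) := by
        simp [stepA, h]
      have hstepB : stepB info (num, maxN, best) i
          = (PySem.List.pySetD num i i, PySem.List.pyGetD info i 0, i) := by
        simp [stepB, h]
      rw [hstepA, hstepB]
      exact ih (i - 1) (by omega) (by omega) _ _ _
        (by rw [PySem.List.length_pySetD, hlen])
        (Or.inl (by
          rw [show i - 1 + 1 = i from by ring]
          exact pyGetD_pySetD_self num i i 0 hibd.1 hibd.2))
    · have hbest : PySem.List.pyGetD num (i + 1) 0 = best := hH.resolve_right h
      have hstepA : stepA info (num, maxN) i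
          = (PySem.List.pySetD num i best, maxN) := by
        simp only [stepA, if_neg h, hbest]
      have hstepB : stepB info (num, maxN, best) i
          = (PySem.List.pySetD num i best, maxN, best) := by
        simp [stepB, h]
      rw [hstepA, hstepB]
      exact ih (i - 1) (by omega) (by omega) _ _ _
        (by rw [PySem.List.length_pySetD, hlen])
        (Or.inl (by
          rw [show i - 1 + 1 = i from by ring]
          exact pyGetD_pySetD_self num i best 0 hibd.1 hibd.2))

-- ===== VERDICT (by name: the statement is the Claim_ definition above) =====
theorem solution_spec : Claim_equal_solution := by
  intro e starts _ hpre
  obtain ⟨hne, hbd⟩ := hpre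
  obtain ⟨m, hm⟩ : ∃ m, PySem.List.min? starts (fun x => x) = some m := by
    cases hmin : PySem.List.min? starts (fun x => x) with
    | none => exact absurd ((PySem.List.min?_eq_none_iff _ _).mp hmin) hne
    | some m => exact ⟨m, rfl⟩
  have hmmem : m ∈ starts := PySem.List.min?_mem hm
  obtain ⟨hm1, hm2⟩ := hbd m hmmem
  have he0 : 0 ≤ e := by omega
  unfold Spec_solution
  rw [solution_eq_list, solutionAlt_eq_list, table_eq]
  simp only [hm, Option.getD_some]
  refine List.map_congr_left (fun s _ => ?_)
  congr 1
  exact dp_inv (sieveBL e) e m (by omega) (e - m + 1).toNat e (by omega) le_rfl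
    (initL e) 0 0 (initL_length e)
    (Or.inr (sieveBL_nonneg e he0))
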